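-- pv_equiv track=rewrite | github.com/felixmiranda1/Cologrid-Game | core/views.py | rotate_explainer
-- ===== SOURCE A (Python) =====
-- def rotate_explainer(players, previous_explainer_id=None):
--     """Return the id of the next explainer in the list of non-host players."""
--     if not players:
--         return None
--
--     eligible_ids = [p["id"] for p in players if not p.get("is_host")]
--     if not eligible_ids:
--         return None
--
--     if previous_explainer_id in eligible_ids:
--         next_idx = (eligible_ids.index(previous_explainer_id) + 1) % len(eligible_ids)
--     else:
--         next_idx = 0
--     return eligible_ids[next_idx]
-- ===== SOURCE B (Python) =====
-- def rotate_explainer(players, previous_explainer_id=None):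
--     """One fused pass: track the first eligible id and whether previous was seen;
--     return the eligible id right after previous, wrapping to the first."""
--     first = None
--     found = False
--     for p in players:
--         if p.get("is_host"):
--             continue
--         pid = p["id"]
--         if found:
--             return pid
--         if first is None:
--             first = pid
--         if previous_explainer_id == pid:
--             found = True
--     return first
-- ===== Notes on version B (the rewrite author's own statement) =====
-- stated objective: alternative
-- what changed: Replaces A's build-eligible-list + .index + modulo-wrap indexing with a single fused pass over players that tracks the first eligible id and a previous-seen flag, returning the next eligible id immediately.
import Mathlib
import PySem

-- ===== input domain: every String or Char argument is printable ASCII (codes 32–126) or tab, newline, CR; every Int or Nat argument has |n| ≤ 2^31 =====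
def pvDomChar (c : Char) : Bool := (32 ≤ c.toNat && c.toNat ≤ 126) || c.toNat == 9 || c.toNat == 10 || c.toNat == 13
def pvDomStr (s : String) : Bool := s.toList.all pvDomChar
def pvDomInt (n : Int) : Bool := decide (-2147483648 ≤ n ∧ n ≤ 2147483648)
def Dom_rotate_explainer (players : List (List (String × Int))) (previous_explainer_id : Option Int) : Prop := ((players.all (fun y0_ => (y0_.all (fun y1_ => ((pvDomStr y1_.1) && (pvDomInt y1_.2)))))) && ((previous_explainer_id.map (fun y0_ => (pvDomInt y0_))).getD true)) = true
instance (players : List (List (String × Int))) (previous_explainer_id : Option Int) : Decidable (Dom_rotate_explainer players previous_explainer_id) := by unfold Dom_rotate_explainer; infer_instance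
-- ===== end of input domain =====

-- B replaces A's list-build + .index + modulo wrap with one fused pass keeping
-- (first eligible id, previous-seen flag); objective: alternative decomposition, same O(n).

-- ===== PORT A =====
-- shared dict primitive: Python `p.get(k)` / `p[k]` on a dict built from the pair list
def pvGet (p : List (String × Int)) (k : String) : Option Int :=
  (PySem.Dict.ofList p).get? k

-- A's comprehension `[p["id"] for p in players if not p.get("is_host")]`; none = KeyError
def pvEligA : List (List (String × Int)) → Option (List Int)
  | [] => some []
  | p :: rest =>
    if (pvGet p "is_host").getD 0 ≠ 0 then pvEligA rest
    else match pvGet p "id" with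
      | none => none
      | some v => (pvEligA rest).map (v :: ·)

def rotate_explainer (players : List (List (String × Int))) (previous_explainer_id : Option Int) : Option Int :=
  if players = [] then none
  else match pvEligA players with
    | none => none   -- KeyError: excluded by Pre_
    | some eligible_ids =>
      if eligible_ids = [] then none
      else
        let next_idx : Nat :=
          match previous_explainer_id with
          | some pid =>
            if pid ∈ eligible_ids then
              ((PySem.List.index? eligible_ids pid).getD 0 + 1) % eligible_ids.length
            else 0
          | none => 0
        PySem.List.pyGet? eligible_ids (next_idx : Int)

-- ===== PORT B =====
-- Source B's single loop; state = (first eligible id seen, previous-seen flag); none = KeyError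
def pvGoB (prev : Option Int) : List (List (String × Int)) → Option Int → Bool → Option Int
  | [], first, _ => first
  | p :: rest, first, found =>
    if (pvGet p "is_host").getD 0 ≠ 0 then pvGoB prev rest first found
    else match pvGet p "id" with
      | none => none   -- KeyError: excluded by Pre_
      | some pid =>
        if found then some pid
        else pvGoB prev rest (if first.isNone then some pid else first) (prev == some pid)

def rotate_explainer_alt (players : List (List (String × Int))) (previous_explainer_id : Option Int) : Option Int :=
  pvGoB previous_explainer_id players none false

-- ===== PRECONDITION & SPEC =====
-- Pre_ excludes exactly the inputs where A raises KeyError: a non-host player without an "id" key.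
def Pre_rotate_explainer (players : List (List (String × Int))) (previous_explainer_id : Option Int) : Prop :=
  ∀ p ∈ players, (pvGet p "is_host").getD 0 = 0 → (pvGet p "id").isSome = true

instance (players : List (List (String × Int))) (previous_explainer_id : Option Int) : Decidable (Pre_rotate_explainer players previous_explainer_id) := by
  unfold Pre_rotate_explainer; infer_instance

def pvWitness_rotate_explainer : (List (List (String × Int))) × Option Int :=
  ([[("id", 1)], [("id", 2), ("is_host", 1)], [("id", 3)]], some 1)

def Spec_rotate_explainer (players : List (List (String × Int))) (previous_explainer_id : Option Int) (out : Option Int) : Prop := out = rotate_explainer_alt players previous_explainer_id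
instance (players : List (List (String × Int))) (previous_explainer_id : Option Int) (out : Option Int) : Decidable (Spec_rotate_explainer players previous_explainer_id out) := by unfold Spec_rotate_explainer; infer_instance

-- ===== CLAIM (what is proved, stated in full; the proofs are below) =====
def Claim_equal_rotate_explainer : Prop := ∀ (players : List (List (String × Int))) (previous_explainer_id : Option Int), Dom_rotate_explainer players previous_explainer_id → Pre_rotate_explainer players previous_explainer_id → Spec_rotate_explainer players previous_explainer_id (rotate_explainer players previous_explainer_id)

-- ===== LEMMAS AND PROOFS =====

-- the eligible-id list, as a pure function (defined wherever Pre_ holds)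
def pvElig : List (List (String × Int)) → List Int
  | [] => []
  | p :: rest =>
    if (pvGet p "is_host").getD 0 ≠ 0 then pvElig rest
    else (pvGet p "id").getD 0 :: pvElig rest

lemma pvEligA_eq (players : List (List (String × Int)))
    (h : ∀ p ∈ players, (pvGet p "is_host").getD 0 = 0 → (pvGet p "id").isSome = true) :
    pvEligA players = some (pvElig players) := by
  induction players with
  | nil => rfl
  | cons p rest ih =>
    have hrest : ∀ q ∈ rest, (pvGet q "is_host").getD 0 = 0 → (pvGet q "id").isSome = true :=
      fun q hq => h q (List.mem_cons_of_mem _ hq)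
    by_cases hh : (pvGet p "is_host").getD 0 ≠ 0
    · simp [pvEligA, pvElig, hh, ih hrest]
    · push_neg at hh
      have hid := h p (List.mem_cons_self) hh
      obtain ⟨v, hv⟩ := Option.isSome_iff_exists.mp hid
      simp [pvEligA, pvElig, hh, hv, ih hrest]

-- B's loop replayed over the eligible-id list
def pvGoE (prev : Option Int) : List Int → Option Int → Bool → Option Int
  | [], first, _ => first
  | x :: xs, first, found =>
    if found then some x
    else pvGoE prev xs (if first.isNone then some x else first) (prev == some x)

lemma pvGoB_eq (prev : Option Int) (players : List (List (String × Int)))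
    (h : ∀ p ∈ players, (pvGet p "is_host").getD 0 = 0 → (pvGet p "id").isSome = true)
    (first : Option Int) (found : Bool) :
    pvGoB prev players first found = pvGoE prev (pvElig players) first found := by
  induction players generalizing first found with
  | nil => rfl
  | cons p rest ih =>
    have hrest : ∀ q ∈ rest, (pvGet q "is_host").getD 0 = 0 → (pvGet q "id").isSome = true :=
      fun q hq => h q (List.mem_cons_of_mem _ hq)
    by_cases hh : (pvGet p "is_host").getD 0 ≠ 0
    · simp [pvGoB, pvElig, hh, ih hrest]
    · push_neg at hh
      obtain ⟨v, hv⟩ := Option.isSome_iff_exists.mp (h p (List.mem_cons_self) hh)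
      cases found with
      | true => simp [pvGoB, pvElig, pvGoE, hh, hv]
      | false => simp [pvGoB, pvElig, pvGoE, hh, hv, ih hrest]

-- the eligible id following the first occurrence of pid (none if pid is last)
def pvNextOf (pid : Int) : List Int → Option Int
  | [] => none
  | x :: xs => if x = pid then xs.head? else pvNextOf pid xs

lemma pvGoE_true (prev : Option Int) (E : List Int) (first : Option Int) :
    pvGoE prev E first true = match E with | [] => first | x :: _ => some x := by
  cases E <;> simp [pvGoE]

lemma pvGoE_some (prev : Option Int) (E : List Int) (a : Int) :
    pvGoE prev E (some a) false =
      some (match prev with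
            | none => a
            | some pid => if pid ∈ E then (pvNextOf pid E).getD a else a) := by
  induction E with
  | nil => cases prev <;> simp [pvGoE]
  | cons x xs ih =>
    cases prev with
    | none => simpa [pvGoE] using ih
    | some pid =>
      by_cases hx : pid = x
      · subst hx
        rw [pvGoE]
        simp only [Bool.false_eq_true, beq_self_eq_true, Option.isNone_some, ↓reduceIte]
        rw [pvGoE_true]
        cases xs <;> simp [pvNextOf]
      · have hx' : x ≠ pid := fun h => hx (Eq.symm h)
        have hbeq : ((some pid : Option Int) == some x) = false := by simp [hx]
        rw [pvGoE]
        simp only [Bool.false_eq_true, ↓reduceIte, Option.isNone_some, hbeq]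
        simpa [pvNextOf, hx, hx'] using ih

lemma pvGoE_start (prev : Option Int) (E : List Int) :
    pvGoE prev E none false =
      match E with
      | [] => none
      | x :: _ => some (match prev with
          | none => x
          | some pid => if pid ∈ E then (pvNextOf pid E).getD x else x) := by
  cases E with
  | nil => rfl
  | cons x xs =>
    cases prev with
    | none => simp [pvGoE, pvGoE_some]
    | some pid =>
      by_cases hx : pid = x
      · subst hx
        rw [pvGoE]
        simp only [Bool.false_eq_true, ↓reduceIte, beq_self_eq_true, Option.isNone_none]
        rw [pvGoE_true]
        cases xs <;> simp [pvNextOf]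
      · have hbeq : ((some pid : Option Int) == some x) = false := by simp [hx]
        rw [pvGoE]
        simp only [Bool.false_eq_true, ↓reduceIte, Option.isNone_none, hbeq]
        rw [pvGoE_some]
        have hx' : x ≠ pid := fun h => hx (Eq.symm h)
        simp [pvNextOf, hx, hx']

lemma pvNextOf_append (pid : Int) (pre suf : List Int) (hpre : pid ∉ pre) :
    pvNextOf pid (pre ++ pid :: suf) = suf.head? := by
  induction pre with
  | nil => simp [pvNextOf]
  | cons y ys ih =>
    have hy : y ≠ pid := fun h => hpre (h ▸ List.mem_cons_self)
    simp only [List.cons_append, pvNextOf, if_neg hy]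
    exact ih (fun h => hpre (List.mem_cons_of_mem _ h))

lemma pv_index_next (E : List Int) (x : Int) (xs : List Int) (hE : E = x :: xs)
    (pid : Int) (hm : pid ∈ E) :
    PySem.List.pyGet? E (((((PySem.List.index? E pid).getD 0 + 1) % E.length : Nat)) : Int) =
      some ((pvNextOf pid E).getD x) := by
  obtain ⟨k, hk⟩ := Option.isSome_iff_exists.mp ((PySem.List.index?_isSome_iff E pid).mpr hm)
  obtain ⟨pre, suf, hdec, hlen, hpre⟩ := (PySem.List.index?_eq_some_iff E pid k).mp hk
  rw [hk]
  simp only [Option.getD_some]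
  subst hlen
  cases suf with
  | nil =>
    have hlenE : E.length = pre.length + 1 := by rw [hdec]; simp
    have hmod : (pre.length + 1) % E.length = 0 := by rw [hlenE]; exact Nat.mod_self _
    rw [hmod]
    have hnext : pvNextOf pid E = none := by
      rw [hdec, pvNextOf_append pid pre [] hpre]; rfl
    rw [hnext]
    simp only [Option.getD_none]
    rw [show ((0 : Nat) : Int) = 0 by rfl, PySem.List.pyGet?_zero, hE]
    simp
  | cons s t =>
    have hlt : pre.length + 1 < E.length := by rw [hdec]; simp
    rw [Nat.mod_eq_of_lt hlt, PySem.List.pyGet?_natCast]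
    have hnext : pvNextOf pid E = some s := by
      rw [hdec, pvNextOf_append pid pre (s :: t) hpre]; rfl
    rw [hnext]
    simp only [Option.getD_some]
    rw [hdec]
    rw [List.getElem?_append_right (by omega)]
    simp

-- ===== VERDICT (by name: the statement is the Claim_ definition above) =====
theorem rotate_explainer_spec : Claim_equal_rotate_explainer := by
  intro players prev _ hpre
  unfold Spec_rotate_explainer rotate_explainer_alt rotate_explainer
  rw [pvGoB_eq prev players hpre, pvGoE_start]
  by_cases hnil : players = []
  · subst hnil; rfl
  · rw [if_neg hnil, pvEligA_eq players hpre]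
    rcases hEe : pvElig players with _ | ⟨x, xs⟩
    · simp
    · simp only [reduceCtorEq, ↓reduceIte]
      cases prev with
      | none =>
        show PySem.List.pyGet? (x :: xs) (((0 : Nat) : Int)) = some x
        rw [show ((0 : Nat) : Int) = 0 by rfl, PySem.List.pyGet?_zero]
        rfl
      | some pid =>
        show PySem.List.pyGet? (x :: xs)
            (((if pid ∈ x :: xs then ((PySem.List.index? (x :: xs) pid).getD 0 + 1) % (x :: xs).length else 0 : Nat)) : Int)
          = some (if pid ∈ x :: xs then (pvNextOf pid (x :: xs)).getD x else x)
        by_cases hm : pid ∈ x :: xs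
        · rw [if_pos hm, if_pos hm]
          exact pv_index_next (x :: xs) x xs rfl pid hm
        · rw [if_neg hm, if_neg hm]
          rw [show ((0 : Nat) : Int) = 0 by rfl, PySem.List.pyGet?_zero]
          rfl
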